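-- pv_equiv track=rewrite | github.com/Zyoger/RepeatPythonLesson | 7-3/3/3.py | get_max_prime_number_index
-- ===== SOURCE A (Python) =====
-- def check_prime_number(num):
--     for j in range(2, num - 1):
--         if num % j == 0:
--             return False
--     return True
--
-- def get_max_prime_number_index(mat):
--     index = [0, 0]
--     max_prime_number = 0
--     for l in range(len(mat)):
--         for m in range(len(mat[l])):
--             if check_prime_number(mat[l][m]) and mat[l][m] > max_prime_number:
--                 max_prime_number = mat[l][m]
--                 index[0], index[1] = l, m
--     return index
-- ===== SOURCE B (Python) =====
-- def _is_prime_like(n):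
--     # matches A's check_prime_number on all n >= 1: True iff n <= 3 or n has
--     # no divisor d with 2 <= d <= n-2; tested by trial division up to sqrt(n)
--     if n <= 3:
--         return True
--     d = 2
--     while d * d <= n:
--         if n % d == 0:
--             return False
--         d += 1
--     return True
--
-- def get_max_prime_number_index(mat):
--     candidates = [(v, l, m)
--                   for l, row in enumerate(mat)
--                   for m, v in enumerate(row)
--                   if v > 0 and _is_prime_like(v)]
--     if not candidates:
--         return [0, 0]
--     v, l, m = max(candidates, key=lambda t: t[0])  # first maximal -> row-major earliest
--     return [l, m]
-- ===== Notes on version B (the rewrite author's own statement) =====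
-- stated objective: faster
-- what changed: B replaces A's O(V) per-cell primality scan (range(2,num-1)) with trial division up to sqrt, and replaces the running-max nested loops with a flat candidate comprehension plus a single max(key=...) call.
import Mathlib
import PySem

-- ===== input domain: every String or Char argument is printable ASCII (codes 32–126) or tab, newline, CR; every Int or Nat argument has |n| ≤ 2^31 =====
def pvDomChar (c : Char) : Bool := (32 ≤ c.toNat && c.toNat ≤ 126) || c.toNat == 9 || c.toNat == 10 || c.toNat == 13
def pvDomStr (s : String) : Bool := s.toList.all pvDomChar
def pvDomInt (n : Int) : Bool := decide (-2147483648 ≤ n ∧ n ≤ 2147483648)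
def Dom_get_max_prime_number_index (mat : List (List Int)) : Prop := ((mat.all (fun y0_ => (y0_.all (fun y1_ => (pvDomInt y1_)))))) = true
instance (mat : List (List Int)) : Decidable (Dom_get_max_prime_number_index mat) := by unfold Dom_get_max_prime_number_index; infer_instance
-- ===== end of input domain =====

-- B: trial division up to sqrt(num) instead of A's scan of range(2, num-1), and a flat
-- candidate list + max(key) instead of A's running-max nested loops.

-- ===== PORT A =====
-- 'for j in range(2, num - 1): if num % j == 0: return False' as an early-exit recursion
-- over the loop counter (range(2, num-1) is iterated lazily, never materialised)
def check_loop (num j : Int) : Bool :=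
  if j < num - 1 then
    if PySem.Int.mod num j == 0 then false else check_loop num (j + 1)
  else true
termination_by (num - 1 - j).toNat
decreasing_by omega

def check_prime_number (num : Int) : Bool := check_loop num 2

def get_max_prime_number_index (mat : List (List Int)) : List Int :=
  let st := (PySem.List.pyRange 0 (PySem.List.len mat) 1).foldl
    (fun (st : Int × Int × Int) l =>
      let row := PySem.List.pyGetD mat l []
      (PySem.List.pyRange 0 (PySem.List.len row) 1).foldl
        (fun (st : Int × Int × Int) m =>
          let v := PySem.List.pyGetD row m 0
          if check_prime_number v && decide (v > st.2.2) then (l, m, v) else st) st)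
    ((0:Int), (0:Int), (0:Int))
  [st.1, st.2.1]

-- ===== PORT B =====
-- the 'while d*d <= n' loop of _is_prime_like; the '2 ≤ d' conjunct only makes the recursion
-- total (every call site has 2 ≤ d, so it never changes the computed value)
def trialDiv (n d : Int) : Bool :=
  if h : 2 ≤ d ∧ d * d ≤ n then
    if PySem.Int.mod n d == 0 then false else trialDiv n (d + 1)
  else true
termination_by (n - d).toNat
decreasing_by
  have h2 : 2 * d ≤ d * d := by nlinarith [h.1]
  omega

def isPrimeLike (n : Int) : Bool :=
  if n ≤ 3 then true else trialDiv n 2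

def get_max_prime_number_index_alt (mat : List (List Int)) : List Int :=
  let candidates := (PySem.List.enumerate mat).flatMap (fun lr =>
    (PySem.List.enumerate lr.2).filterMap (fun mv =>
      if mv.2 > 0 && isPrimeLike mv.2 then some (mv.2, lr.1, mv.1) else none))
  match PySem.List.max? candidates (fun t => t.1) with
  | none => [0, 0]
  | some t => [t.2.1, t.2.2]

-- ===== PRECONDITION & SPEC =====
def Spec_get_max_prime_number_index (mat : List (List Int)) (out : List Int) : Prop := out = get_max_prime_number_index_alt mat
instance (mat : List (List Int)) (out : List Int) : Decidable (Spec_get_max_prime_number_index mat out) := by unfold Spec_get_max_prime_number_index; infer_instance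

-- ===== CLAIM (what is proved, stated in full; the proofs are below) =====
def Claim_equal_get_max_prime_number_index : Prop := ∀ (mat : List (List Int)), Dom_get_max_prime_number_index mat → Spec_get_max_prime_number_index mat (get_max_prime_number_index mat)

-- ===== LEMMAS AND PROOFS =====

-- A's primality loop, characterised
lemma check_loop_spec (num j : Int) :
    check_loop num j = true ↔ ∀ k : Int, j ≤ k → k < num - 1 → ¬ k ∣ num := by
  induction j using check_loop.induct (num := num) with
  | case1 j h hm =>
    rw [check_loop, if_pos h, if_pos hm]
    refine iff_of_false (by simp) ?_
    intro H
    exact absurd ((by simpa [PySem.Int.mod_eq_zero_iff_dvd] using hm) : j ∣ num)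
      (H j le_rfl h)
  | case2 j h hm ih =>
    rw [check_loop, if_pos h, if_neg hm, ih]
    constructor
    · intro H k hk hk2
      rcases lt_or_ge j k with h' | h'
      · exact H k (by omega) hk2
      · have : k = j := le_antisymm h' hk
        subst this
        simp [PySem.Int.mod_eq_zero_iff_dvd] at hm
        exact hm
    · intro H k hk hk2
      exact H k (by omega) hk2
  | case3 j h =>
    rw [check_loop, if_neg h]
    simp only [true_iff]
    intro k hk hk2
    omega

-- A's primality test, characterised
lemma check_spec (v : Int) :
    check_prime_number v = true ↔ ∀ j : Int, 2 ≤ j → j < v - 1 → ¬ j ∣ v := by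
  rw [check_prime_number, check_loop_spec]

-- B's trial-division loop, characterised (for 2 ≤ d)
lemma trialDiv_spec (n d : Int) :
    2 ≤ d → (trialDiv n d = true ↔ ∀ e : Int, d ≤ e → e * e ≤ n → ¬ e ∣ n) := by
  induction d using trialDiv.induct (n := n) with
  | case1 d h hm =>
    intro _
    rw [trialDiv, dif_pos h, if_pos hm]
    refine iff_of_false (by simp) ?_
    simp only [not_forall, not_not]
    refine ⟨d, le_rfl, h.2, ?_⟩
    simpa [PySem.Int.mod_eq_zero_iff_dvd] using hm
  | case2 d h hm ih =>
    intro _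
    rw [trialDiv, dif_pos h, if_neg hm, ih (by omega)]
    constructor
    · intro H e he hee
      rcases lt_or_ge d e with h' | h'
      · exact H e (by omega) hee
      · have : e = d := le_antisymm h' he
        subst this
        simp [PySem.Int.mod_eq_zero_iff_dvd] at hm
        exact hm
    · intro H e he hee
      exact H e (by omega) hee
  | case3 d h =>
    intro hd
    rw [trialDiv, dif_neg h]
    simp only [true_iff]
    intro e he hee _
    exact h ⟨hd, by nlinarith⟩

-- the two primality tests agree on positive inputs
lemma prime_bridge (v : Int) (hv : 1 ≤ v) : check_prime_number v = isPrimeLike v := by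
  by_cases h3 : v ≤ 3
  · rw [isPrimeLike, if_pos h3, (check_spec v).mpr (by intro j h1 h2 _; omega)]
  · rw [isPrimeLike, if_neg h3, Bool.eq_iff_iff, check_spec,
        trialDiv_spec v 2 (le_refl 2)]
    constructor
    · intro H e h2e hee hdvd
      have h2 : 2 * e ≤ e * e := by nlinarith
      exact H e h2e (by omega) hdvd
    · intro H j h2j hjv hdvd
      obtain ⟨k, hk⟩ := hdvd
      have hkpos : 0 < k := by nlinarith
      have hk2 : 2 ≤ k := by
        rcases lt_or_ge k 2 with h' | h'
        · have : k = 1 := by omega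
          subst this; omega
        · exact h'
      by_cases hjj : j * j ≤ v
      · exact H j h2j hjj ⟨k, hk⟩
      · rw [not_le] at hjj
        have hkj : k < j := by nlinarith
        have hkk : k * k ≤ v := by nlinarith
        exact H k hk2 hkk ⟨j, by rw [hk, mul_comm]⟩

-- the strict running max over a list equals PySem.List.max?'s running first-max
lemma foldl_max_align (t : List (Int × Int × Int)) (c : Int × Int × Int) :
    t.foldl (fun (st : Int × Int × Int) x =>
        if x.1 > st.2.2 then (x.2.1, x.2.2, x.1) else st) (c.2.1, c.2.2, c.1)
      = (fun r : Int × Int × Int => (r.2.1, r.2.2, r.1))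
          (t.foldl (fun m x => if m.1 < x.1 then x else m) c) := by
  induction t generalizing c with
  | nil => rfl
  | cons x t ih =>
    simp only [List.foldl_cons]
    by_cases h : c.1 < x.1 <;> simp [h, gt_iff_lt, ih]

lemma max?_foldl_some {α : Type} (t : List α) (c : α) (key : α → Int) :
    t.foldl (fun (acc : Option α) x =>
        match acc with
        | none => some x
        | some m => if key m < key x then some x else some m) (some c)
      = some (t.foldl (fun m x => if key m < key x then x else m) c) := by
  induction t generalizing c with
  | nil => rfl
  | cons x t ih => simp only [List.foldl_cons]; split <;> simp [ih]

-- skipping non-candidates: A's step ignores every cell the filter drops (running max stays ≥ 0)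
lemma foldl_filter_skip (cs : List (Int × Int × Int)) (st : Int × Int × Int) (hst : 0 ≤ st.2.2) :
    cs.foldl (fun (st : Int × Int × Int) x =>
        if check_prime_number x.1 && decide (x.1 > st.2.2) then (x.2.1, x.2.2, x.1) else st) st
      = (cs.filter (fun x => x.1 > 0 && isPrimeLike x.1)).foldl
          (fun (st : Int × Int × Int) x =>
            if check_prime_number x.1 && decide (x.1 > st.2.2) then (x.2.1, x.2.2, x.1) else st) st := by
  induction cs generalizing st with
  | nil => rfl
  | cons c cs ih =>
    by_cases hp : (decide (c.1 > 0) && isPrimeLike c.1) = true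
    · simp only [List.filter_cons, hp, if_true, List.foldl_cons]
      split
      · refine ih _ ?_
        simp only [Bool.and_eq_true, decide_eq_true_eq] at hp
        show (0:Int) ≤ c.1
        omega
      · exact ih _ hst
    · simp only [List.filter_cons, hp, List.foldl_cons]
      have hskip : (if check_prime_number c.1 && decide (c.1 > st.2.2) then (c.2.1, c.2.2, c.1) else st) = st := by
        simp only [Bool.and_eq_true, decide_eq_true_eq, not_and] at hp ⊢
        by_cases hpos : 0 < c.1
        · have : check_prime_number c.1 = false := by
            rw [prime_bridge c.1 (by omega)]
            simpa using hp hpos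
          simp [this]
        · have : ¬ c.1 > st.2.2 := by omega
          simp [this]
      rw [hskip]
      exact ih st hst

def pvCells (mat : List (List Int)) : List (Int × Int × Int) :=
  (PySem.List.enumerate mat).flatMap (fun lr =>
    (PySem.List.enumerate lr.2).map (fun mv => (mv.2, lr.1, mv.1)))

-- one row of A's inner loop, re-read as a fold over the row's enumerated cells
lemma row_fold (l : Int) (row : List Int) (st : Int × Int × Int) :
    (PySem.List.pyRange 0 (PySem.List.len row) 1).foldl
      (fun (st : Int × Int × Int) m =>
        let v := PySem.List.pyGetD row m 0
        if check_prime_number v && decide (v > st.2.2) then (l, m, v) else st) st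
    = ((PySem.List.enumerate row).map (fun mv => (mv.2, l, mv.1))).foldl
        (fun (st x : Int × Int × Int) =>
          if check_prime_number x.1 && decide (x.1 > st.2.2) then (x.2.1, x.2.2, x.1) else st) st := by
  rw [PySem.List.enumerate_eq_map_pyRange row 0, List.map_map, List.foldl_map]
  rfl

-- A's nested index loops, re-read as one fold over the flattened enumerated cells
lemma a_as_cells (mat : List (List Int)) :
    get_max_prime_number_index mat
      = [((pvCells mat).foldl
            (fun (st x : Int × Int × Int) =>
              if check_prime_number x.1 && decide (x.1 > st.2.2) then (x.2.1, x.2.2, x.1) else st)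
            ((0:Int), (0:Int), (0:Int))).1,
         ((pvCells mat).foldl
            (fun (st x : Int × Int × Int) =>
              if check_prime_number x.1 && decide (x.1 > st.2.2) then (x.2.1, x.2.2, x.1) else st)
            ((0:Int), (0:Int), (0:Int))).2.1] := by
  simp only [get_max_prime_number_index, pvCells]
  rw [List.foldl_flatMap, PySem.List.enumerate_eq_map_pyRange mat ([] : List Int),
      List.foldl_map]
  have h := PySem.List.foldl_congr_mem (PySem.List.pyRange 0 (PySem.List.len mat))
    (fun (st : Int × Int × Int) l =>
      let row := PySem.List.pyGetD mat l []
      (PySem.List.pyRange 0 (PySem.List.len row) 1).foldl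
        (fun (st : Int × Int × Int) m =>
          let v := PySem.List.pyGetD row m 0
          if check_prime_number v && decide (v > st.2.2) then (l, m, v) else st) st)
    (fun (st : Int × Int × Int) l =>
      ((PySem.List.enumerate (PySem.List.pyGetD mat l [])).map
          (fun mv => (mv.2, l, mv.1))).foldl
        (fun (st x : Int × Int × Int) =>
          if check_prime_number x.1 && decide (x.1 > st.2.2) then (x.2.1, x.2.2, x.1) else st) st)
    ((0:Int), (0:Int), (0:Int))
    (fun acc l _ => row_fold l (PySem.List.pyGetD mat l []) acc)
  rw [h]

lemma filterMap_if {α β : Type} (l : List α) (f : α → β) (p : β → Bool) :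
    l.filterMap (fun x => if p (f x) then some (f x) else none) = (l.map f).filter p := by
  induction l with
  | nil => rfl
  | cons a l ih => by_cases h : p (f a) = true <;>
      simp [h, ih]

-- B's candidate comprehension is the filtered flattened cell list
lemma b_as_cells (mat : List (List Int)) :
    get_max_prime_number_index_alt mat
      = (match PySem.List.max?
            ((pvCells mat).filter (fun x => x.1 > 0 && isPrimeLike x.1)) (fun t => t.1) with
         | none => [0, 0]
         | some t => [t.2.1, t.2.2]) := by
  simp only [get_max_prime_number_index_alt, pvCells]
  rw [List.filter_flatMap]
  have h : (fun lr : Int × List Int =>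
        (PySem.List.enumerate lr.2).filterMap
          (fun mv => if mv.2 > 0 && isPrimeLike mv.2 then some (mv.2, lr.1, mv.1) else none))
      = (fun lr : Int × List Int =>
        ((PySem.List.enumerate lr.2).map (fun mv => (mv.2, lr.1, mv.1))).filter
          (fun x => x.1 > 0 && isPrimeLike x.1)) := by
    funext lr
    exact filterMap_if (PySem.List.enumerate lr.2) (fun mv => (mv.2, lr.1, mv.1))
      (fun x => x.1 > 0 && isPrimeLike x.1)
  rw [h]

-- ===== VERDICT (by name: the statement is the Claim_ definition above) =====
theorem get_max_prime_number_index_spec : Claim_equal_get_max_prime_number_index := by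
  intro mat _
  unfold Spec_get_max_prime_number_index
  rw [a_as_cells, b_as_cells,
      foldl_filter_skip (pvCells mat) ((0:Int), (0:Int), (0:Int)) (by simp)]
  have hcongr : ((pvCells mat).filter (fun x => x.1 > 0 && isPrimeLike x.1)).foldl
        (fun (st x : Int × Int × Int) =>
          if check_prime_number x.1 && decide (x.1 > st.2.2) then (x.2.1, x.2.2, x.1) else st)
        ((0:Int), (0:Int), (0:Int))
      = ((pvCells mat).filter (fun x => x.1 > 0 && isPrimeLike x.1)).foldl
        (fun (st x : Int × Int × Int) =>
          if x.1 > st.2.2 then (x.2.1, x.2.2, x.1) else st)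
        ((0:Int), (0:Int), (0:Int)) := by
    apply PySem.List.foldl_congr_mem
    intro acc x hx
    have hp := List.of_mem_filter hx
    simp only [Bool.and_eq_true, decide_eq_true_eq] at hp
    have hchk : check_prime_number x.1 = true := by
      rw [prime_bridge x.1 (by omega)]; exact hp.2
    simp [hchk]
  rw [hcongr]
  cases hc : (pvCells mat).filter (fun x => x.1 > 0 && isPrimeLike x.1) with
  | nil => rfl
  | cons c t =>
    have hcpos : (0:Int) < c.1 := by
      have hm : c ∈ (pvCells mat).filter (fun x => x.1 > 0 && isPrimeLike x.1) := by
        rw [hc]; exact List.mem_cons_self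
      have hp := List.of_mem_filter hm
      simp only [Bool.and_eq_true, decide_eq_true_eq] at hp
      exact hp.1
    rw [List.foldl_cons]
    have h0 : (if c.1 > ((0:Int), (0:Int), (0:Int)).2.2 then (c.2.1, c.2.2, c.1)
          else ((0:Int), (0:Int), (0:Int))) = (c.2.1, c.2.2, c.1) := by
      simp [hcpos]
    rw [h0, foldl_max_align t c]
    have hmax : PySem.List.max? (c :: t) (fun t => t.1)
        = some (t.foldl (fun m x => if m.1 < x.1 then x else m) c) := by
      simp only [PySem.List.max?, List.foldl_cons]
      exact max?_foldl_some t c (fun t => t.1)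
    rw [hmax]
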